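-- pv_equiv track=rewrite | github.com/lomoeg/article_to_voice_telegram_bot | article_parser.py | divide_text
-- ===== SOURCE A (Python) =====
-- def divide_text(text):
--     if len(text) <= 5000:
--         return [text]
--     else:
--         divided_text_array = []
--         idx = 0
--         while idx < len(text):
--             part = text[idx:idx+5000]
--             # Find the last meaningful end of sentence
--             end_of_block = max(part.rfind('. '), part.rfind('? '), part.rfind('! '))
--             if end_of_block != -1:
--                 divided_text_array.append(part[:end_of_block+2])
--                 idx += end_of_block + 2
--             else:
--                 divided_text_array.append(part)
--                 idx += 5000
--     return divided_text_array
-- ===== SOURCE B (Python) =====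
-- def divide_text(text):
--     if len(text) <= 5000:
--         return [text]
--     n = len(text)
--     # one pass: start indices of every '. '/'? '/'! ' sentence boundary
--     ends = [i for i in range(n) if text[i] in '.?!' and i + 1 < n and text[i + 1] == ' ']
--     parts = []
--     idx = 0
--     while idx < n:
--         window = [i for i in ends if idx <= i and i + 2 <= idx + 5000]
--         if window:
--             i = max(window)
--             parts.append(text[idx:i + 2])
--             idx = i + 2
--         else:
--             parts.append(text[idx:idx + 5000])
--             idx += 5000
--     return parts
-- ===== Notes on version B (the rewrite author's own statement) =====
-- stated objective: alternative
-- what changed: Replaces A's per-chunk triple rfind over each 5000-char window with a single precomputed list of all sentence-boundary positions plus a packing loop that picks the greatest boundary fitting in the current window.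
import Mathlib
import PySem

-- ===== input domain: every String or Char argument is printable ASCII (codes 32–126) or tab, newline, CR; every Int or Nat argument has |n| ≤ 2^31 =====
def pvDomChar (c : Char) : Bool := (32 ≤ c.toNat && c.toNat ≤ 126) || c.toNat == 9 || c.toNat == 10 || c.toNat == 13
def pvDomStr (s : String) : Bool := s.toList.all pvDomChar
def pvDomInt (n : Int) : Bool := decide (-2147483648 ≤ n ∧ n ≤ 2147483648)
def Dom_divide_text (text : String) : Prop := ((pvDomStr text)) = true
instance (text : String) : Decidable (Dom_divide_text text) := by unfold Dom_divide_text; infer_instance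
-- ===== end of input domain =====

-- B replaces the per-chunk triple rfind with one precomputed list of sentence-boundary
-- positions plus a packing loop (alternative decomposition; no speed claim).

-- ===== PORT A =====

-- hand-port of Python's str.rfind for a nonempty needle: the greatest index i with
-- s[i:i+len(pat)] == pat, else -1 (exact: last match wins in the left-to-right fold)
def bestIdx (Q : Nat → Bool) (n : Nat) : Int :=
  (List.range n).foldl (fun acc i => if Q i then (i : Int) else acc) (-1)

def pvRfind (s pat : List Char) : Int :=
  bestIdx (fun i => (s.drop i).take pat.length == pat) s.length

def divideLoopA (t : List Char) : Nat → Nat → List (List Char)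
  | _, 0 => []
  | idx, fuel+1 =>
    if idx < t.length then
      let part := (t.drop idx).take 5000
      let e := max (max (pvRfind part ['.', ' ']) (pvRfind part ['?', ' '])) (pvRfind part ['!', ' '])
      if e ≠ -1 then
        part.take (e.toNat + 2) :: divideLoopA t (idx + (e.toNat + 2)) fuel
      else
        part :: divideLoopA t (idx + 5000) fuel
    else []

def divide_text (text : String) : List String :=
  let t := text.toList
  if t.length ≤ 5000 then [text]
  else (divideLoopA t 0 t.length).map String.ofList

-- ===== PORT B =====

-- text[i] in '.?!' and i+1 < n and text[i+1] == ' ' (getElem? = none encodes out of range)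
def isEnd (t : List Char) (i : Nat) : Bool :=
  ((t[i]? = some '.') || (t[i]? = some '?') || (t[i]? = some '!')) && (t[i+1]? = some ' ')

def sentenceEnds (t : List Char) : List Nat :=
  (List.range t.length).filter (fun i => isEnd t i)

def packB (t : List Char) (ends : List Nat) : Nat → Nat → List (List Char)
  | _, 0 => []
  | idx, fuel+1 =>
    if idx < t.length then
      match (ends.filter (fun i => idx ≤ i && i + 2 ≤ idx + 5000)).max? with
      | some i => (t.drop idx).take (i + 2 - idx) :: packB t ends (i + 2) fuel
      | none => (t.drop idx).take 5000 :: packB t ends (idx + 5000) fuel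
    else []

def divide_text_alt (text : String) : List String :=
  let t := text.toList
  if t.length ≤ 5000 then [text]
  else (packB t (sentenceEnds t) 0 t.length).map String.ofList

-- ===== PRECONDITION & SPEC =====
def Spec_divide_text (text : String) (out : List String) : Prop := out = divide_text_alt text
instance (text : String) (out : List String) : Decidable (Spec_divide_text text out) := by unfold Spec_divide_text; infer_instance

-- ===== CLAIM (what is proved, stated in full; the proofs are below) =====
def Claim_equal_divide_text : Prop := ∀ (text : String), Dom_divide_text text → Spec_divide_text text (divide_text text)

-- ===== LEMMAS AND PROOFS =====

lemma bestIdx_succ (Q : Nat → Bool) (n : Nat) :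
    bestIdx Q (n+1) = if Q n then (n : Int) else bestIdx Q n := by
  simp [bestIdx, List.range_succ]

lemma bestIdx_lt (Q : Nat → Bool) (n : Nat) : bestIdx Q n < (n : Int) := by
  induction n with
  | zero => norm_num [bestIdx]
  | succ n ih =>
    rw [bestIdx_succ]
    split
    · omega
    · omega

lemma bestIdx_or (Q1 Q2 : Nat → Bool) (n : Nat) :
    bestIdx (fun i => Q1 i || Q2 i) n = max (bestIdx Q1 n) (bestIdx Q2 n) := by
  induction n with
  | zero => simp [bestIdx]
  | succ n ih =>
    have h1 := bestIdx_lt Q1 n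
    have h2 := bestIdx_lt Q2 n
    rw [bestIdx_succ, bestIdx_succ, bestIdx_succ, ih]
    cases hq1 : Q1 n <;> cases hq2 : Q2 n <;>
      simp [max_eq_right (le_of_lt h1), max_eq_left (le_of_lt h2)]

lemma bestIdx_spec (Q : Nat → Bool) (n : Nat) :
    (bestIdx Q n = -1 ∧ ∀ i, i < n → Q i = false) ∨
    (∃ m, m < n ∧ bestIdx Q n = (m : Int) ∧ Q m = true ∧ ∀ i, i < n → Q i = true → i ≤ m) := by
  induction n with
  | zero => exact Or.inl ⟨rfl, by omega⟩
  | succ n ih =>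
    rw [bestIdx_succ]
    cases hq : Q n with
    | true =>
      exact Or.inr ⟨n, by omega, by simp, hq, fun i hi _ => by omega⟩
    | false =>
      rcases ih with ⟨h1, h2⟩ | ⟨m, hm, h1, h2, h3⟩
      · refine Or.inl ⟨by simp [h1], fun i hi => ?_⟩
        by_cases hin : i = n
        · subst hin; exact hq
        · exact h2 i (by omega)
      · refine Or.inr ⟨m, by omega, by simp [h1], h2, fun i hi hQi => ?_⟩
        by_cases hin : i = n
        · subst hin; rw [hq] at hQi; cases hQi
        · exact h3 i (by omega) hQi

lemma take_two_eq (l : List Char) (a b : Char) :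
    (l.take 2 = [a, b]) ↔ (l[0]? = some a ∧ l[1]? = some b) := by
  match l with
  | [] => simp
  | [x] => simp
  | x :: y :: rest => simp [List.take]

lemma take_drop_two (s : List Char) (i : Nat) (a b : Char) :
    ((s.drop i).take 2 = [a, b]) ↔ (s[i]? = some a ∧ s[i+1]? = some b) := by
  rw [take_two_eq, List.getElem?_drop, List.getElem?_drop]
  simp

lemma getElem?_part (t : List Char) (idx j : Nat) (c : Char) :
    ((((t.drop idx).take 5000))[j]? = some c) ↔ (j < 5000 ∧ t[idx+j]? = some c) := by
  by_cases h : j < 5000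
  · simp [List.getElem?_drop, h]
  · simp [h]

-- the combined boolean condition behind A's three rfinds
def QA (t : List Char) (idx e : Nat) : Bool :=
  (((t.drop idx).take 5000).drop e).take 2 == ['.', ' '] ||
  (((t.drop idx).take 5000).drop e).take 2 == ['?', ' '] ||
  (((t.drop idx).take 5000).drop e).take 2 == ['!', ' ']

lemma maxE_eq_bestIdx (t : List Char) (idx : Nat) :
    max (max (pvRfind ((t.drop idx).take 5000) ['.', ' ']) (pvRfind ((t.drop idx).take 5000) ['?', ' ']))
        (pvRfind ((t.drop idx).take 5000) ['!', ' ']) =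
    bestIdx (QA t idx) ((t.drop idx).take 5000).length := by
  unfold pvRfind QA
  rw [← bestIdx_or, ← bestIdx_or]
  rfl

lemma QA_iff (t : List Char) (idx e : Nat) :
    QA t idx e = true ↔ (isEnd t (idx + e) = true ∧ e + 2 ≤ 5000) := by
  unfold QA isEnd
  simp only [Bool.or_eq_true, beq_iff_eq, take_drop_two, getElem?_part, Bool.and_eq_true,
    decide_eq_true_eq, ← Nat.add_assoc]
  constructor
  · rintro ((⟨⟨he0, h1⟩, he1, h2⟩ | ⟨⟨he0, h1⟩, he1, h2⟩) | ⟨⟨he0, h1⟩, he1, h2⟩)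
    · exact ⟨⟨Or.inl (Or.inl h1), h2⟩, by omega⟩
    · exact ⟨⟨Or.inl (Or.inr h1), h2⟩, by omega⟩
    · exact ⟨⟨Or.inr h1, h2⟩, by omega⟩
  · rintro ⟨⟨h1, h2⟩, h3⟩
    rcases h1 with (h1 | h1) | h1
    · exact Or.inl (Or.inl ⟨⟨by omega, h1⟩, by omega, h2⟩)
    · exact Or.inl (Or.inr ⟨⟨by omega, h1⟩, by omega, h2⟩)
    · exact Or.inr ⟨⟨by omega, h1⟩, by omega, h2⟩

lemma isEnd_lt (t : List Char) (i : Nat) (h : isEnd t i = true) : i + 1 < t.length := by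
  unfold isEnd at h
  simp only [Bool.and_eq_true, decide_eq_true_eq] at h
  have := h.2
  rw [List.getElem?_eq_some_iff] at this
  exact this.1

lemma mem_windowFilter (t : List Char) (idx i : Nat) :
    i ∈ (sentenceEnds t).filter (fun i => idx ≤ i && i + 2 ≤ idx + 5000) ↔
    (isEnd t i = true ∧ idx ≤ i ∧ i + 2 ≤ idx + 5000) := by
  simp only [sentenceEnds, List.mem_filter, List.mem_range, Bool.and_eq_true, decide_eq_true_eq]
  constructor
  · rintro ⟨⟨_, h2⟩, h3, h4⟩; exact ⟨h2, h3, h4⟩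
  · rintro ⟨h2, h3, h4⟩
    exact ⟨⟨by have := isEnd_lt t i h2; omega, h2⟩, h3, h4⟩

lemma QA_of_window (t : List Char) (idx i : Nat) (h1 : isEnd t i = true)
    (h2 : idx ≤ i) (h3 : i + 2 ≤ idx + 5000) : QA t idx (i - idx) = true := by
  rw [QA_iff]
  have h : idx + (i - idx) = i := by omega
  rw [h]
  exact ⟨h1, by omega⟩

lemma step_eq (t : List Char) (idx : Nat) :
    (max (max (pvRfind ((t.drop idx).take 5000) ['.', ' ']) (pvRfind ((t.drop idx).take 5000) ['?', ' ']))
        (pvRfind ((t.drop idx).take 5000) ['!', ' ']) = -1 ∧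
      ((sentenceEnds t).filter (fun i => idx ≤ i && i + 2 ≤ idx + 5000)).max? = none) ∨
    (∃ m : Nat, max (max (pvRfind ((t.drop idx).take 5000) ['.', ' ']) (pvRfind ((t.drop idx).take 5000) ['?', ' ']))
        (pvRfind ((t.drop idx).take 5000) ['!', ' ']) = (m : Int) ∧
      ((sentenceEnds t).filter (fun i => idx ≤ i && i + 2 ≤ idx + 5000)).max? = some (idx + m) ∧
      m + 2 ≤ 5000) := by
  rw [maxE_eq_bestIdx]
  rcases bestIdx_spec (QA t idx) ((t.drop idx).take 5000).length with ⟨h1, h2⟩ | ⟨m, hm, h1, h2, h3⟩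
  · refine Or.inl ⟨h1, ?_⟩
    rw [List.max?_eq_none_iff, List.eq_nil_iff_forall_not_mem]
    intro i hi
    rw [mem_windowFilter] at hi
    obtain ⟨hi1, hi2, hi3⟩ := hi
    have hq := QA_of_window t idx i hi1 hi2 hi3
    have hlt : i - idx < ((t.drop idx).take 5000).length := by
      have := isEnd_lt t i hi1
      simp only [List.length_take, List.length_drop]
      omega
    rw [h2 _ hlt] at hq
    cases hq
  · refine Or.inr ⟨m, h1, ?_, ((QA_iff t idx m).mp h2).2⟩
    have hend := ((QA_iff t idx m).mp h2).1
    have hle := ((QA_iff t idx m).mp h2).2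
    rw [List.max?_eq_some_iff]
    constructor
    · rw [mem_windowFilter]
      exact ⟨hend, by omega, by omega⟩
    · intro b hb
      rw [mem_windowFilter] at hb
      obtain ⟨hb1, hb2, hb3⟩ := hb
      have hq := QA_of_window t idx b hb1 hb2 hb3
      have hlt : b - idx < ((t.drop idx).take 5000).length := by
        have := isEnd_lt t b hb1
        simp only [List.length_take, List.length_drop]
        omega
      have := h3 _ hlt hq
      omega

lemma loop_eq (t : List Char) : ∀ (fuel idx : Nat),
    divideLoopA t idx fuel = packB t (sentenceEnds t) idx fuel := by
  intro fuel
  induction fuel with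
  | zero => intro idx; rfl
  | succ fuel ih =>
    intro idx
    simp only [divideLoopA, packB]
    by_cases hidx : idx < t.length
    · simp only [if_pos hidx]
      rcases step_eq t idx with ⟨he, hw⟩ | ⟨m, he, hw, hm⟩
      · simp only [he, hw]
        rw [if_neg (by simp)]
        rw [ih]
      · simp only [he, hw]
        rw [if_pos (show ((m : Int)) ≠ -1 by omega)]
        have htn : ((m : Int)).toNat = m := Int.toNat_natCast m
        rw [htn]
        have harith : idx + m + 2 - idx = m + 2 := by omega
        have hchunk : ((t.drop idx).take 5000).take (m + 2) = (t.drop idx).take (m + 2) := by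
          have hmin : min (m + 2) 5000 = m + 2 := by omega
          rw [List.take_take, hmin]
        have hassoc : idx + (m + 2) = idx + m + 2 := by omega
        rw [harith, hchunk, hassoc, ih]
    · simp only [if_neg hidx]

-- ===== VERDICT (by name: the statement is the Claim_ definition above) =====
theorem divide_text_spec : Claim_equal_divide_text := by
  intro text _
  unfold Spec_divide_text divide_text divide_text_alt
  by_cases h : text.length ≤ 5000
  · simp [h]
  · simp only [String.length_toList, h, if_false]
    rw [loop_eq]
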